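-- pv_equiv track=rewrite | github.com/yhibo/foobar | Level_4/free_the_bunny_workers/solution.py | solution
-- ===== SOURCE A (Python) =====
-- from itertools import combinations
--
-- def solution(num_buns, num_required):
--     """
--     This function returns a list of key distribution such that
--     any num_required bunnies can open the locks.
--     """
--
--     # Minimum number of copies required for num_required bunnies to open the locks
--     number_of_key_copies = num_buns - num_required + 1
--
--     # Get all possible bunnies combination a single key could be given to
--     bunnies_combinations = combinations(range(num_buns), number_of_key_copies)
--
--     # Assing keys in lexicographical order
--     key_distribution = [[] for _ in range(num_buns)]
--     for key, bunnies in enumerate(bunnies_combinations):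
--         for bunny in bunnies:
--             key_distribution[bunny].append(key)
--
--     return key_distribution
-- ===== SOURCE B (Python) =====
-- from itertools import combinations
--
-- def solution(num_buns, num_required):
--     # Gather each bunny's keys from the enumerated combinations (transpose),
--     # instead of scattering each key into preallocated per-bunny lists.
--     combos = list(combinations(range(num_buns), num_buns - num_required + 1))
--     combo_sets = [set(c) for c in combos]
--     return [[k for k, s in enumerate(combo_sets) if b in s]
--             for b in range(num_buns)]
-- ===== Notes on version B (the rewrite author's own statement) =====
-- stated objective: simpler
-- what changed: B enumerates the combinations once and builds the result per bunny by filtering them (gather/transpose), instead of A's scatter that appends each key into a preallocated list per member.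
import Mathlib
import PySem

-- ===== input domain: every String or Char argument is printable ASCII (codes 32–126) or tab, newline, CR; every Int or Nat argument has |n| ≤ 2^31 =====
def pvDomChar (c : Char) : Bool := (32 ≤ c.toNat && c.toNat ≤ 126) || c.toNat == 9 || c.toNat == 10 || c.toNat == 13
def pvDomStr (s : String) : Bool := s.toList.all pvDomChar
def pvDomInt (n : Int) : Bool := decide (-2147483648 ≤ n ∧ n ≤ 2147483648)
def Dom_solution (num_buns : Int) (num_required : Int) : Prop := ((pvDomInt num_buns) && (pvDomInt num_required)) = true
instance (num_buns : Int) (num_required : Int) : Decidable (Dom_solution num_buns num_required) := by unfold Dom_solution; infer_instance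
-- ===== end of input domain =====

-- B gathers each bunny's keys by filtering the enumerated combinations (transpose),
-- instead of A's scatter appending each key into preallocated per-bunny lists; same cost, simpler.

-- itertools.combinations(pool, r) in lexicographic order (shared library helper of both ports)
def pyCombinations : List Int → Nat → List (List Int)
  | _, 0 => [[]]
  | [], _ + 1 => []
  | x :: xs, r + 1 =>
    -- short-circuit of the library call: combinations(pool, r) is empty when r > len(pool)
    if xs.length + 1 < r + 1 then []
    else (pyCombinations xs r).map (x :: ·) ++ pyCombinations xs (r + 1)

-- ===== PORT A =====
-- key_distribution[bunny].append(key)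
def pvAppendAt (kd : List (List Int)) (i : Nat) (k : Int) : List (List Int) :=
  kd.set i (kd.getD i [] ++ [k])

def solution (num_buns : Int) (num_required : Int) : List (List Int) :=
  let number_of_key_copies := num_buns - num_required + 1
  let bunnies_combinations :=
    pyCombinations (PySem.List.pyRange 0 num_buns 1) number_of_key_copies.toNat
  let key_distribution := (List.range num_buns.toNat).map (fun _ => ([] : List Int))
  (PySem.List.enumerate bunnies_combinations 0).foldl
    (fun kd p => p.2.foldl (fun kd bunny => pvAppendAt kd bunny.toNat p.1) kd)
    key_distribution

-- ===== PORT B =====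
def solution_alt (num_buns : Int) (num_required : Int) : List (List Int) :=
  let combos := pyCombinations (PySem.List.pyRange 0 num_buns 1) (num_buns - num_required + 1).toNat
  let combo_sets := combos.map (fun c => PySem.Set.ofList c)
  (PySem.List.pyRange 0 num_buns 1).map
    (fun b => (PySem.List.enumerate combo_sets 0).filterMap
      (fun p => if b ∈ p.2 then some p.1 else none))

-- ===== PRECONDITION & SPEC =====
-- Pre_: itertools.combinations raises ValueError when r = num_buns - num_required + 1 is negative.
def Pre_solution (num_buns : Int) (num_required : Int) : Prop := 0 ≤ num_buns - num_required + 1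
instance (num_buns : Int) (num_required : Int) : Decidable (Pre_solution num_buns num_required) := by unfold Pre_solution; infer_instance
def pvWitness_solution : Int × Int := (4, 2)

def Spec_solution (num_buns : Int) (num_required : Int) (out : List (List Int)) : Prop := out = solution_alt num_buns num_required
instance (num_buns : Int) (num_required : Int) (out : List (List Int)) : Decidable (Spec_solution num_buns num_required out) := by unfold Spec_solution; infer_instance

-- ===== CLAIM (what is proved, stated in full; the proofs are below) =====
def Claim_equal_solution : Prop := ∀ (num_buns : Int) (num_required : Int), Dom_solution num_buns num_required → Pre_solution num_buns num_required → Spec_solution num_buns num_required (solution num_buns num_required)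

-- ===== LEMMAS AND PROOFS =====

-- every combination is a sublist of the pool
theorem pyCombinations_sublist {l : List Int} {r : Nat} {c : List Int}
    (h : c ∈ pyCombinations l r) : c.Sublist l := by
  induction l generalizing r c with
  | nil =>
    cases r with
    | zero => simp [pyCombinations] at h; simp [h]
    | succ r => simp [pyCombinations] at h
  | cons x xs ih =>
    cases r with
    | zero => simp [pyCombinations] at h; simp [h]
    | succ r =>
      simp only [pyCombinations] at h
      split_ifs at h with hl
      · simp at h
      · simp only [List.mem_append, List.mem_map] at h
        rcases h with ⟨c', hc', rfl⟩ | h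
        · exact (ih hc').cons₂ x
        · exact (ih h).cons x

theorem pvAppendAt_length (kd : List (List Int)) (i : Nat) (k : Int) :
    (pvAppendAt kd i k).length = kd.length := by
  simp [pvAppendAt]

theorem inner_length (bs : List Int) (key : Int) (kd : List (List Int)) :
    (bs.foldl (fun kd b => pvAppendAt kd b.toNat key) kd).length = kd.length := by
  induction bs generalizing kd with
  | nil => rfl
  | cons b bs ih => simp [List.foldl_cons, ih, pvAppendAt_length]

theorem scatter_length (assoc : List (Int × List Int)) (kd : List (List Int)) :
    (assoc.foldl (fun kd p => p.2.foldl (fun kd b => pvAppendAt kd b.toNat p.1) kd) kd).length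
      = kd.length := by
  induction assoc generalizing kd with
  | nil => rfl
  | cons p ps ih => simp [List.foldl_cons, ih, inner_length]

theorem getD_pvAppendAt_ne (kd : List (List Int)) (i j : Nat) (k : Int) (hne : j ≠ i) :
    (pvAppendAt kd i k).getD j [] = kd.getD j [] := by
  simp [pvAppendAt, List.getD, List.getElem?_set_ne (Ne.symm hne)]

theorem getD_pvAppendAt_self (kd : List (List Int)) (i : Nat) (k : Int) (hi : i < kd.length) :
    (pvAppendAt kd i k).getD i [] = kd.getD i [] ++ [k] := by
  simp [pvAppendAt, List.getD, List.getElem?_set_self hi, List.getElem?_eq_getElem hi]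

-- unchanged at an index not in bs (indices compared as Ints over nonneg values)
theorem inner_getD_not_mem (bs : List Int) (key : Int) (kd : List (List Int)) (b : Int)
    (hb : 0 ≤ b) (hnn : ∀ x ∈ bs, 0 ≤ x) (hnm : b ∉ bs) :
    (bs.foldl (fun kd b' => pvAppendAt kd b'.toNat key) kd).getD b.toNat [] = kd.getD b.toNat [] := by
  induction bs generalizing kd with
  | nil => rfl
  | cons x xs ih =>
    simp only [List.mem_cons, not_or] at hnm
    have hx : 0 ≤ x := hnn x (List.mem_cons_self)
    have hne : b.toNat ≠ x.toNat := fun h => hnm.1 (by omega)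
    rw [List.foldl_cons, ih _ (fun y hy => hnn y (List.mem_cons_of_mem _ hy)) hnm.2,
      getD_pvAppendAt_ne _ _ _ _ hne]

theorem inner_getD (bs : List Int) (key : Int) (kd : List (List Int)) (b : Int)
    (hb : 0 ≤ b) (hlt : b.toNat < kd.length)
    (hnn : ∀ x ∈ bs, 0 ≤ x) (hnd : bs.Nodup) :
    (bs.foldl (fun kd b' => pvAppendAt kd b'.toNat key) kd).getD b.toNat []
      = kd.getD b.toNat [] ++ (if b ∈ bs then [key] else []) := by
  induction bs generalizing kd with
  | nil => simp
  | cons x xs ih =>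
    have hx : 0 ≤ x := hnn x (List.mem_cons_self)
    have hnn' : ∀ y ∈ xs, 0 ≤ y := fun y hy => hnn y (List.mem_cons_of_mem _ hy)
    rw [List.foldl_cons]
    by_cases hbx : b = x
    · subst hbx
      have hnm : b ∉ xs := (List.nodup_cons.mp hnd).1
      rw [inner_getD_not_mem xs key _ b hb hnn' hnm,
        getD_pvAppendAt_self _ _ _ hlt]
      simp
    · have hne : b.toNat ≠ x.toNat := fun h => hbx (by omega)
      rw [ih _ (by rwa [pvAppendAt_length]) hnn' (List.nodup_cons.mp hnd).2,
        getD_pvAppendAt_ne _ _ _ _ hne]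
      simp [hbx]

theorem scatter_getD (assoc : List (Int × List Int)) (kd : List (List Int)) (b : Int)
    (hb : 0 ≤ b) (hlt : b.toNat < kd.length)
    (hok : ∀ p ∈ assoc, (∀ x ∈ p.2, 0 ≤ x) ∧ p.2.Nodup) :
    (assoc.foldl (fun kd p => p.2.foldl (fun kd b' => pvAppendAt kd b'.toNat p.1) kd) kd).getD b.toNat []
      = kd.getD b.toNat []
        ++ assoc.filterMap (fun p => if b ∈ p.2 then some p.1 else none) := by
  induction assoc generalizing kd with
  | nil => simp
  | cons p ps ih =>
    have hp := hok p (List.mem_cons_self)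
    rw [List.foldl_cons,
      ih _ (by rwa [inner_length]) (fun q hq => hok q (List.mem_cons_of_mem _ hq)),
      inner_getD _ _ _ _ hb hlt hp.1 hp.2]
    by_cases hm : b ∈ p.2 <;> simp [hm]

theorem enumerate_map {A B : Type} (f : A → B) (l : List A) (s : Int) :
    PySem.List.enumerate (l.map f) s = (PySem.List.enumerate l s).map (fun p => (p.1, f p.2)) := by
  induction l generalizing s with
  | nil => simp [PySem.List.enumerate_nil]
  | cons x xs ih => simp [PySem.List.enumerate_cons, ih]

-- ===== VERDICT (by name: the statement is the Claim_ definition above) =====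
theorem solution_spec : Claim_equal_solution := by
  intro n r _ _
  unfold Spec_solution solution solution_alt
  set pool := PySem.List.pyRange 0 n 1 with hpool
  set combos := pyCombinations pool (n - r + 1).toNat with hcombos
  set assoc := PySem.List.enumerate combos 0 with hassoc
  -- the set(c) membership of B equals list membership of c
  have hsets : ∀ (b : Int),
      (PySem.List.enumerate (combos.map (fun c => PySem.Set.ofList c)) 0).filterMap
        (fun p => if b ∈ p.2 then some p.1 else none)
      = assoc.filterMap (fun p => if b ∈ p.2 then some p.1 else none) := by
    intro b
    rw [enumerate_map, List.filterMap_map]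
    apply List.filterMap_congr
    intro p _
    simp [PySem.Set.mem_ofList]
  simp only [hsets]
  have hok : ∀ p ∈ assoc, (∀ x ∈ p.2, 0 ≤ x) ∧ p.2.Nodup := by
    intro p hp
    have hmem : p.2 ∈ combos := by
      have := List.mem_map_of_mem (f := Prod.snd) hp
      rwa [PySem.List.map_snd_enumerate] at this
    have hsub : p.2.Sublist pool := pyCombinations_sublist hmem
    constructor
    · intro x hx
      have hxp : x ∈ pool := hsub.mem hx
      rw [hpool, PySem.List.mem_pyRange_one] at hxp
      exact hxp.1
    · exact (PySem.List.nodup_pyRange_one 0 n).sublist hsub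
  -- both sides have length n.toNat
  have hlenA : ((assoc.foldl
      (fun kd p => p.2.foldl (fun kd bunny => pvAppendAt kd bunny.toNat p.1) kd)
      ((List.range n.toNat).map (fun _ => ([] : List Int))))).length = n.toNat := by
    rw [scatter_length]; simp
  apply List.ext_getElem
  · rw [hlenA]
    simp [hpool, PySem.List.length_pyRange_one]
  · intro i h1 h2
    have hin : i < n.toNat := by rw [hlenA] at h1; exact h1
    have hpl : i < pool.length := by
      simpa [hpool, PySem.List.length_pyRange_one] using hin
    have hpi : pool[i]'hpl = (i : Int) := by
      simp [hpool, PySem.List.getElem_pyRange_one]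
    have hmapi : (pool.map (fun b => assoc.filterMap
        (fun p => if b ∈ p.2 then some p.1 else none)))[i]
        = assoc.filterMap (fun p => if (i : Int) ∈ p.2 then some p.1 else none) := by
      rw [List.getElem_map]
      rw [hpi]
    rw [hmapi]
    have hget : ((assoc.foldl
        (fun kd p => p.2.foldl (fun kd bunny => pvAppendAt kd bunny.toNat p.1) kd)
        ((List.range n.toNat).map (fun _ => ([] : List Int)))))[i]
        = ((assoc.foldl
        (fun kd p => p.2.foldl (fun kd bunny => pvAppendAt kd bunny.toNat p.1) kd)
        ((List.range n.toNat).map (fun _ => ([] : List Int))))).getD i [] := by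
      rw [List.getD_eq_getElem _ _ h1]
    rw [hget]
    have := scatter_getD assoc ((List.range n.toNat).map (fun _ => ([] : List Int)))
      (i : Int) (by positivity) (by simpa using hin) hok
    rw [Int.toNat_natCast] at this
    rw [this]
    simp [List.getD, hin]
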